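-- pv_equiv track=rewrite | github.com/3mohamed-abdelfattah/Vernam | Vernam Cipher.py | vernam_cipher
-- ===== SOURCE A (Python) =====
-- def vernam_cipher(plaintext, key):
--
--         # Check if key length is shorter than message..?, then loop the key
--     if len(key) < len(plaintext):
--         key = key * ((len(plaintext) // len(key)) + 1)
--
--         # Ensure key length matches or is more than message
--     key = key[:len(plaintext)]
--
--         # Convert inputs to lists
--     plaintext = [int(bit) for bit in plaintext]
--     key = [int(bit) for bit in key]
--
--         # Perform XOR operation between each bit of message and key
--     ciphertext = [plaintext[i] ^ key[i] for i in range(len(plaintext))]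
--
--         # Convert ciphertext list back to normal input
--     ciphertext_str = ''.join(str(bit) for bit in ciphertext)
--
--     return ciphertext_str
-- ===== SOURCE B (Python) =====
-- def vernam_cipher(plaintext, key):
--     # Stream decomposition: one loop consuming a self-refilling reversed key buffer;
--     # no repeated/truncated key, no indexing or modulo arithmetic.
--     out = []
--     buf = []
--     for p in plaintext:
--         if not buf:
--             buf = list(reversed(key))
--         out.append(str(int(p) ^ int(buf.pop())))
--     return ''.join(out)
-- ===== Notes on version B (the rewrite author's own statement) =====
-- stated objective: alternative
-- what changed: B replaces A's staged pipeline (replicate the key, truncate it, build two int lists, index-based XOR comprehension) by a single accumulator loop over the plaintext that consumes a self-refilling reversed key buffer via pop(), with no key expansion, indexing or modulo arithmetic.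
import Mathlib
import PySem

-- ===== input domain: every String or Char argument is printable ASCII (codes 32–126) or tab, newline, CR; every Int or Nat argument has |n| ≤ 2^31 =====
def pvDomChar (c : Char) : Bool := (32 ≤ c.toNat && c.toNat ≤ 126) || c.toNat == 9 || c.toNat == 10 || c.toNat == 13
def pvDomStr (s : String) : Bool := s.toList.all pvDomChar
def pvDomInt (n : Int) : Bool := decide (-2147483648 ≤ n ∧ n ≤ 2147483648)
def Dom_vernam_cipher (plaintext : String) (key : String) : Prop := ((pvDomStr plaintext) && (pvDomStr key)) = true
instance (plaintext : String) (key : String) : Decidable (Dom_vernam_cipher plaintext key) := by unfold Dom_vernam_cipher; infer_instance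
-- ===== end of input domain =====

-- B is one accumulator loop consuming a self-refilling reversed key buffer (no key expansion, no index/modulo); objective: alternative.

-- int(c) for a one-character string c; none (= Python ValueError) never occurs inside Pre_
def pvIntChar (c : Char) : Int := (PySem.Int.ofChars? [c]).getD 0

-- ===== PORT A =====
def vernam_cipher (plaintext : String) (key : String) : String :=
  let p := plaintext.toList
  let k0 := key.toList
  -- key = key * ((len(plaintext) // len(key)) + 1): both lengths are Nat, so Nat division is Python's //;
  -- key = "" with plaintext ≠ "" raises ZeroDivisionError in Python, excluded by Pre_
  let k1 := if k0.length < p.length then (List.replicate (p.length / k0.length + 1) k0).flatten else k0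
  -- key = key[:len(plaintext)]
  let k2 := k1.take p.length
  -- int(bit): ValueError (non-digit character) is excluded by Pre_
  let pi := p.map pvIntChar
  let ki := k2.map pvIntChar
  -- indices produced by range(len(plaintext)) are always in bounds, so getD's default is never used
  let ct := (List.range pi.length).map (fun i => PySem.Int.bxor (pi.getD i 0) (ki.getD i 0))
  String.ofList (PySem.Chars.join [] (ct.map PySem.Int.toChars))

-- ===== PORT B =====
-- loop body: refill the buffer from list(reversed(key)) when empty, then buf.pop() and append str(int(p) ^ int(popped));
-- pop? = none is Python's IndexError on an empty key, excluded by Pre_ (the state is returned unchanged there)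
def vcStep (key : String) (st : List Char × List (List Char)) (p : Char) : List Char × List (List Char) :=
  let buf := if st.1.isEmpty then key.toList.reverse else st.1
  match PySem.List.pop? buf with
  | some (kc, buf') =>
      (buf', st.2 ++ [PySem.Int.toChars (PySem.Int.bxor (pvIntChar p) (pvIntChar kc))])
  | none => (buf, st.2)

def vernam_cipher_alt (plaintext : String) (key : String) : String :=
  String.ofList (PySem.Chars.join [] ((plaintext.toList.foldl (vcStep key) ([], [])).2))

-- ===== PRECONDITION & SPEC =====
-- Pre_ excludes exactly the inputs where Python A raises: a non-digit plaintext character or a non-digit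
-- among the used key characters (ValueError from int), and an empty key with non-empty plaintext (ZeroDivisionError).
def Pre_vernam_cipher (plaintext : String) (key : String) : Prop :=
  plaintext.toList.all PySem.Chars.isdigit = true ∧
  (plaintext.toList = [] ∨
    (key.toList ≠ [] ∧ (key.toList.take plaintext.toList.length).all PySem.Chars.isdigit = true))
instance (plaintext : String) (key : String) : Decidable (Pre_vernam_cipher plaintext key) := by unfold Pre_vernam_cipher; infer_instance
def pvWitness_vernam_cipher : String × String := ("0101", "11")

def Spec_vernam_cipher (plaintext : String) (key : String) (out : String) : Prop := out = vernam_cipher_alt plaintext key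
instance (plaintext : String) (key : String) (out : String) : Decidable (Spec_vernam_cipher plaintext key out) := by unfold Spec_vernam_cipher; infer_instance

-- ===== CLAIM (what is proved, stated in full; the proofs are below) =====
def Claim_equal_vernam_cipher : Prop := ∀ (plaintext : String) (key : String), Dom_vernam_cipher plaintext key → Pre_vernam_cipher plaintext key → Spec_vernam_cipher plaintext key (vernam_cipher plaintext key)

-- ===== LEMMAS AND PROOFS =====

-- the common reference value both ports are reduced to: chunk i is str(int(p[i]) ^ int(k[i % len k]))
def vcChunks (k : List Char) : Nat → List Char → List (List Char)
  | _, [] => []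
  | i, p :: ps =>
      PySem.Int.toChars (PySem.Int.bxor (pvIntChar p) (pvIntChar (k.getD (i % k.length) ' ')))
        :: vcChunks k (i + 1) ps

-- arithmetic helper: n is covered by n/m + 1 copies of an m-length key
lemma lt_div_succ_mul (n m : Nat) (hm : 0 < m) : n < (n / m + 1) * m := by
  have h1 := Nat.div_add_mod n m
  have h2 := Nat.mod_lt n hm
  rw [Nat.add_mul, one_mul, Nat.mul_comm m (n / m)] at *
  omega

-- stepping the loop counter: the remaining-buffer length after one pop
lemma mod_step (m i : Nat) (hm : 0 < m) : (m - (i + 1) % m) % m = m - i % m - 1 := by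
  rcases Nat.lt_or_ge 1 m with h2 | h1
  · have hj : i % m < m := Nat.mod_lt _ hm
    rw [Nat.add_mod, Nat.mod_eq_of_lt h2]
    by_cases hjl : i % m + 1 = m
    · rw [hjl, Nat.mod_self, Nat.sub_zero, Nat.mod_self]; omega
    · rw [Nat.mod_eq_of_lt (by omega : i % m + 1 < m),
        Nat.mod_eq_of_lt (Nat.sub_lt hm (by omega))]
      omega
  · have hm1 : m = 1 := by omega
    simp [hm1, Nat.mod_one]

-- the flattened replicated key, read in bounds, is the key read modulo its length
lemma getD_flatten_replicate {α : Type} (k : List α) (q i : Nat) (d : α) (h : i < q * k.length) :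
    ((List.replicate q k).flatten).getD i d = k.getD (i % k.length) d := by
  induction q generalizing i with
  | zero => omega
  | succ q ih =>
    have hm : 0 < k.length := by by_contra hm; simp at hm; simp [hm] at h
    simp only [List.replicate_succ, List.flatten_cons]
    by_cases hik : i < k.length
    · rw [List.getD_append _ _ _ _ hik, Nat.mod_eq_of_lt hik]
    · rw [not_lt] at hik
      rw [List.getD_append_right _ _ _ _ hik,
        ih (i - k.length) (by rw [Nat.succ_mul] at h; omega)]
      congr 1
      rw [Nat.mod_eq_sub_mod hik]

-- A's truncated (possibly repeated) key agrees with modular indexing into the original key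
lemma key_char_eq {α : Type} (k : List α) (n i : Nat) (d : α) (hk : k ≠ []) (hi : i < n) :
    ((if k.length < n then (List.replicate (n / k.length + 1) k).flatten else k).take n).getD i d
      = k.getD (i % k.length) d := by
  have hm : 0 < k.length := List.length_pos_iff.mpr hk
  by_cases hln : k.length < n
  · simp only [hln, if_pos]
    rw [List.getD_eq_getElem?_getD, List.getElem?_take_of_lt hi, ← List.getD_eq_getElem?_getD]
    exact getD_flatten_replicate k _ i d (lt_of_lt_of_le hi (le_of_lt (lt_div_succ_mul n k.length hm)))
  · simp only [hln, if_neg, not_false_iff]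
    rw [List.getD_eq_getElem?_getD, List.getElem?_take_of_lt hi, ← List.getD_eq_getElem?_getD,
      Nat.mod_eq_of_lt (by omega)]

-- the truncated key is long enough at every plaintext index
lemma k2_len {α : Type} (k : List α) (n i : Nat) (hk : k ≠ []) (hi : i < n) :
    i < ((if k.length < n then (List.replicate (n / k.length + 1) k).flatten else k).take n).length := by
  have hm : 0 < k.length := List.length_pos_iff.mpr hk
  by_cases hln : k.length < n
  · simp only [hln, if_pos, List.length_take, List.length_flatten]
    simp only [List.map_replicate, List.sum_replicate, smul_eq_mul]
    have := lt_div_succ_mul n k.length hm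
    omega
  · simp only [hln, if_neg, not_false_iff, List.length_take]
    omega

-- A's comprehension, restricted to range' i n, is vcChunks from index i
lemma a_chunks (p k : List Char) (hk : k ≠ []) :
    ∀ (n i : Nat), i + n = p.length →
      ((List.range' i n).map (fun j => PySem.Int.toChars (PySem.Int.bxor
          ((p.map pvIntChar).getD j 0)
          ((((if k.length < p.length then (List.replicate (p.length / k.length + 1) k).flatten else k).take p.length).map pvIntChar).getD j 0))))
        = vcChunks k i (p.drop i) := by
  intro n
  induction n with
  | zero =>
    intro i hi
    simp [List.drop_of_length_le (by omega : p.length ≤ i), vcChunks]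
  | succ n ih =>
    intro i hi
    have hip : i < p.length := by omega
    rw [List.range'_succ, List.map_cons, ih (i + 1) (by omega)]
    rw [List.drop_eq_getElem_cons hip]
    simp only [vcChunks]
    have h1 : (p.map pvIntChar).getD i 0 = pvIntChar p[i] := by
      rw [List.getD_eq_getElem _ _ (by simpa using hip), List.getElem_map]
    have hki := k2_len k p.length i hk hip
    have h2 : (((if k.length < p.length then (List.replicate (p.length / k.length + 1) k).flatten else k).take p.length).map pvIntChar).getD i 0
        = pvIntChar (k.getD (i % k.length) ' ') := by
      rw [List.getD_eq_getElem _ _ (by simpa using hki), List.getElem_map, ← List.getD_eq_getElem]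
      rw [key_char_eq k p.length i ' ' hk hip]
    rw [h1, h2]

-- B's loop invariant: the buffer is the reversed key truncated to (m - i % m) % m elements,
-- and the output accumulates vcChunks
lemma b_loop (key : String) (hk : key.toList ≠ []) :
    ∀ (ps : List Char) (i : Nat) (out : List (List Char)),
      ps.foldl (vcStep key) (key.toList.reverse.take ((key.toList.length - i % key.toList.length) % key.toList.length), out)
        = (key.toList.reverse.take ((key.toList.length - (i + ps.length) % key.toList.length) % key.toList.length),
           out ++ vcChunks key.toList i ps) := by
  intro ps
  induction ps with
  | nil => intro i out; simp [vcChunks]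
  | cons p ps ih =>
    intro i out
    have hm : 0 < key.toList.length := List.length_pos_iff.mpr hk
    have hjm : i % key.toList.length < key.toList.length := Nat.mod_lt _ hm
    obtain ⟨t, ht⟩ : ∃ t, key.toList.length - i % key.toList.length = t + 1 :=
      ⟨key.toList.length - i % key.toList.length - 1, by omega⟩
    have hu : t < key.toList.reverse.length := by rw [List.length_reverse]; omega
    -- the refilled buffer is rev.take (t+1) in both the empty (i % m = 0) and nonempty case
    have hbuf : (if (key.toList.reverse.take ((key.toList.length - i % key.toList.length) % key.toList.length)).isEmpty
          then key.toList.reverse else key.toList.reverse.take ((key.toList.length - i % key.toList.length) % key.toList.length))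
        = key.toList.reverse.take (t + 1) := by
      by_cases hj0 : i % key.toList.length = 0
      · have hto : t + 1 = key.toList.length := by omega
        rw [hj0, Nat.sub_zero, Nat.mod_self]
        simp only [List.take_zero, List.isEmpty_nil, if_true]
        exact (List.take_of_length_le (by rw [List.length_reverse]; omega)).symm
      · have hlt : (key.toList.length - i % key.toList.length) % key.toList.length
            = t + 1 := by rw [ht]; exact Nat.mod_eq_of_lt (by omega)
        rw [hlt]
        have hne : (key.toList.reverse.take (t + 1)).isEmpty = false := by
          rw [List.isEmpty_eq_false_iff, ← List.length_pos_iff, List.length_take, List.length_reverse]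
          omega
        rw [hne]
        simp
    -- split off the last element of the buffer and pop it
    have hsplit : key.toList.reverse.take (t + 1)
        = key.toList.reverse.take t ++ [key.toList.reverse[t]] := by
      rw [List.take_add_one, List.getElem?_eq_getElem hu]
      rfl
    have hpop : PySem.List.pop? (key.toList.reverse.take (t + 1))
        = some (key.toList.reverse[t], key.toList.reverse.take t) := by
      rw [hsplit]; exact PySem.List.pop?_last _ _
    have hkc : key.toList.reverse[t] = key.toList.getD (i % key.toList.length) ' ' := by
      rw [List.getElem_reverse, List.getD_eq_getElem _ _ hjm]
      congr 1
      rw [List.length_reverse] at hu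
      omega
    have hnext : key.toList.reverse.take t
        = key.toList.reverse.take ((key.toList.length - (i + 1) % key.toList.length) % key.toList.length) := by
      rw [mod_step _ i hm]
      congr 1
      omega
    rw [List.foldl_cons]
    simp only [vcStep, hbuf, hpop, hkc, hnext]
    rw [ih (i + 1) (out ++ [PySem.Int.toChars (PySem.Int.bxor (pvIntChar p) (pvIntChar (key.toList.getD (i % key.toList.length) ' ')))])]
    simp only [vcChunks, List.length_cons, Prod.mk.injEq]
    rw [show i + 1 + ps.length = i + (ps.length + 1) from by omega]
    exact ⟨rfl, by simp⟩

-- ===== VERDICT (by name: the statement is the Claim_ definition above) =====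
theorem vernam_cipher_spec : Claim_equal_vernam_cipher := by
  intro plaintext key _ hpre
  unfold Spec_vernam_cipher vernam_cipher vernam_cipher_alt
  simp only []
  congr 1
  congr 1
  rcases hpre with ⟨_, hkey⟩
  rcases hkey with hempty | ⟨hk, _⟩
  · simp [hempty]
  · set p := plaintext.toList with hp
    set k := key.toList with hkdef
    have hm : 0 < k.length := List.length_pos_iff.mpr hk
    -- A side
    have hA : ((List.range (p.map pvIntChar).length).map (fun i => PySem.Int.bxor
          ((p.map pvIntChar).getD i 0)
          ((((if k.length < p.length then (List.replicate (p.length / k.length + 1) k).flatten else k).take p.length).map pvIntChar).getD i 0))).map PySem.Int.toChars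
        = vcChunks k 0 p := by
      rw [List.map_map, List.length_map, List.range_eq_range']
      have := a_chunks p k hk p.length 0 (by omega)
      simpa using this
    -- B side
    have hstart : (0 : Nat) = (k.length - 0 % k.length) % k.length := by
      simp
    have hB := b_loop key hk p 0 []
    rw [show k.reverse.take ((k.length - 0 % k.length) % k.length) = [] by simp] at hB
    rw [hA, hkdef, hB]
    simp
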